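-- pv_equiv track=rewrite | github.com/kellypclarke-maker/chimera_v4 | agents/kalshi-meta/orchestrator/run_live_daemon.py | _infer_polymarket_symbol_map_from_tickers
-- ===== SOURCE A (Python) =====
-- from typing import Any, Dict, List, Optional, Sequence, Tuple
--
-- POLYMARKET_SYMBOL_BY_EVENT_PREFIX: Dict[str, str] = {
--     "KXBTC15M": "btcusdt",
--     "KXBTCD": "btcusdt",
--     "KXBTC": "btcusdt",
--     "KXETH15M": "ethusdt",
--     "KXETHD": "ethusdt",
--     "KXETH": "ethusdt",
--     "KXXRPD": "xrpusdt",
--     "KXXRP": "xrpusdt",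
--     "KXSOLE": "solusdt",
--     "KXSOLD": "solusdt",
--     "KXSOL": "solusdt",
-- }
--
-- def _polymarket_symbol_for_kalshi_ticker(ticker: str) -> Optional[str]:
--     tok = str(ticker or "").strip().upper()
--     if not tok:
--         return None
--     for prefix in sorted(POLYMARKET_SYMBOL_BY_EVENT_PREFIX.keys(), key=len, reverse=True):
--         if tok.startswith(prefix):
--             return str(POLYMARKET_SYMBOL_BY_EVENT_PREFIX[prefix])
--     return None
--
-- def _infer_polymarket_symbol_map_from_tickers(market_tickers: Sequence[str]) -> Dict[str, List[str]]:
--     out: Dict[str, List[str]] = {}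
--     for ticker in market_tickers:
--         tok = str(ticker or "").strip().upper()
--         if not tok:
--             continue
--         symbol = _polymarket_symbol_for_kalshi_ticker(tok)
--         if not symbol:
--             continue
--         out.setdefault(symbol, [])
--         if tok not in out[symbol]:
--             out[symbol].append(tok)
--     return out
-- ===== SOURCE B (Python) =====
-- from typing import Dict, List, Optional, Sequence, Tuple
--
-- POLYMARKET_SYMBOL_BY_EVENT_PREFIX: Dict[str, str] = {
--     "KXBTC15M": "btcusdt",
--     "KXBTCD": "btcusdt",
--     "KXBTC": "btcusdt",
--     "KXETH15M": "ethusdt",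
--     "KXETHD": "ethusdt",
--     "KXETH": "ethusdt",
--     "KXXRPD": "xrpusdt",
--     "KXXRP": "xrpusdt",
--     "KXSOLE": "solusdt",
--     "KXSOLD": "solusdt",
--     "KXSOL": "solusdt",
-- }
--
-- _MAX_PREFIX_LEN = max(len(k) for k in POLYMARKET_SYMBOL_BY_EVENT_PREFIX)
--
--
-- def _symbol_and_token(ticker: str) -> Optional[Tuple[str, str]]:
--     """Normalize once; longest-prefix match by probing the table with tok[:L] directly."""
--     tok = str(ticker or "").strip().upper()
--     for L in range(min(len(tok), _MAX_PREFIX_LEN), 0, -1):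
--         symbol = POLYMARKET_SYMBOL_BY_EVENT_PREFIX.get(tok[:L])
--         if symbol is not None:
--             return symbol, tok
--     return None
--
--
-- def _infer_polymarket_symbol_map_from_tickers(market_tickers: Sequence[str]) -> Dict[str, List[str]]:
--     out: Dict[str, List[str]] = {}
--     seen = set()
--     for ticker in market_tickers:
--         hit = _symbol_and_token(ticker)
--         if hit is None or hit in seen:
--             continue
--         seen.add(hit)
--         symbol, tok = hit
--         out.setdefault(symbol, []).append(tok)
--     return out
-- ===== Notes on version B (the rewrite author's own statement) =====
-- stated objective: faster
-- what changed: The longest-prefix search now probes the prefix table directly with tok[:L] for L from the maximum key length down (instead of sorting all keys by descending length and scanning them with startswith), and per-symbol deduplication uses one seen-set of (symbol, token) pairs instead of a linear 'tok not in out[symbol]' list scan; normalization happens once per ticker instead of twice.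
import Mathlib
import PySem

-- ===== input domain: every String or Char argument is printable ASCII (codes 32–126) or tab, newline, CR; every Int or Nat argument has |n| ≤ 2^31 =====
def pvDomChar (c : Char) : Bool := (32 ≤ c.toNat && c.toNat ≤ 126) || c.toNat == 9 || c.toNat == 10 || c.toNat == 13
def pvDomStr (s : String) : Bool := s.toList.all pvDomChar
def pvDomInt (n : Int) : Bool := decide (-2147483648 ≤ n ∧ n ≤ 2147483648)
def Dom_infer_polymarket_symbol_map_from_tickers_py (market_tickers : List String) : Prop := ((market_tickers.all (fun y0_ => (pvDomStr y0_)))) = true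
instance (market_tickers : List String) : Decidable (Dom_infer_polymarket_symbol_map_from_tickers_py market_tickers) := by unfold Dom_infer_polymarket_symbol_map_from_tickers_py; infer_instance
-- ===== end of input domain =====

-- B replaces A's sort-all-prefixes-and-scan-with-startswith longest-prefix search by direct
-- table probes with tok[:L] for decreasing L, and A's per-list membership dedup by one seen-set.

-- ===== PORT A =====
-- module constant POLYMARKET_SYMBOL_BY_EVENT_PREFIX (keys as char lists; PySem.Dict keeps Python's insertion order)
def pvTableA : PySem.Dict (List Char) String := PySem.Dict.ofList
  [("KXBTC15M".toList, "btcusdt"), ("KXBTCD".toList, "btcusdt"), ("KXBTC".toList, "btcusdt"),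
   ("KXETH15M".toList, "ethusdt"), ("KXETHD".toList, "ethusdt"), ("KXETH".toList, "ethusdt"),
   ("KXXRPD".toList, "xrpusdt"), ("KXXRP".toList, "xrpusdt"),
   ("KXSOLE".toList, "solusdt"), ("KXSOLD".toList, "solusdt"), ("KXSOL".toList, "solusdt")]

-- 'for prefix in sorted(keys, key=len, reverse=True): if tok.startswith(prefix): return str(d[prefix])'
-- (the scanned prefix comes from d.keys, so the d[prefix] access is total: ported as getD with a dummy default)
def pvScanA (tok : List Char) : List (List Char) → Option String
  | [] => none
  | p :: ps => if PySem.Chars.startswith tok p then some (pvTableA.getD p "") else pvScanA tok ps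

-- def _polymarket_symbol_for_kalshi_ticker  (str(ticker or "") is ticker itself for a str argument)
def pvSymbolForA (ticker : List Char) : Option String :=
  let tok := PySem.Chars.upper (PySem.Chars.strip ticker)
  if tok = [] then none
  else pvScanA tok (PySem.List.sorted pvTableA.keys (fun k => PySem.Chars.len k) true)

-- the body of the 'for ticker in market_tickers' loop, state = out
def pvLoopA : List String → PySem.Dict String (List String) → PySem.Dict String (List String)
  | [], out => out
  | ticker :: rest, out =>
    let tok := PySem.Chars.upper (PySem.Chars.strip ticker.toList)
    if tok = [] then pvLoopA rest out
    else
      match pvSymbolForA tok with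
      | none => pvLoopA rest out
      | some symbol =>
        if symbol = "" then pvLoopA rest out        -- 'if not symbol: continue'
        else
          let out1 := out.setdefault symbol []
          if String.ofList tok ∈ out1.getD symbol [] then pvLoopA rest out1
          else pvLoopA rest (out1.insert symbol (out1.getD symbol [] ++ [String.ofList tok]))

def infer_polymarket_symbol_map_from_tickers_py (market_tickers : List String) : List (String × List String) :=
  (pvLoopA market_tickers PySem.Dict.empty).items

-- ===== PORT B =====
def pvTableB : PySem.Dict (List Char) String := PySem.Dict.ofList
  [("KXBTC15M".toList, "btcusdt"), ("KXBTCD".toList, "btcusdt"), ("KXBTC".toList, "btcusdt"),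
   ("KXETH15M".toList, "ethusdt"), ("KXETHD".toList, "ethusdt"), ("KXETH".toList, "ethusdt"),
   ("KXXRPD".toList, "xrpusdt"), ("KXXRP".toList, "xrpusdt"),
   ("KXSOLE".toList, "solusdt"), ("KXSOLD".toList, "solusdt"), ("KXSOL".toList, "solusdt")]

-- _MAX_PREFIX_LEN = max(len(k) for k in d)   (d is a non-empty literal, so max() cannot raise; ported as max? + getD)
def pvMaxPrefixLen : Int :=
  (PySem.List.max? (pvTableB.keys.map (fun k => PySem.Chars.len k)) (fun x => x)).getD 0

-- 'for L in range(min(len(tok), _MAX_PREFIX_LEN), 0, -1): symbol = d.get(tok[:L]); if symbol is not None: return symbol, tok'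
def pvProbeB (tok : List Char) : List Int → Option (String × String)
  | [] => none
  | L :: rest =>
    match pvTableB.get? (PySem.Chars.slice tok none (some L)) with
    | some symbol => some (symbol, String.ofList tok)
    | none => pvProbeB tok rest

def pvSymbolAndTokenB (ticker : List Char) : Option (String × String) :=
  let tok := PySem.Chars.upper (PySem.Chars.strip ticker)
  pvProbeB tok (PySem.List.pyRange (min (tok.length : Int) pvMaxPrefixLen) 0 (-1))

def pvLoopB : List String → PySem.Dict String (List String) → PySem.Set (String × String) → PySem.Dict String (List String)
  | [], out, _ => out
  | ticker :: rest, out, seen =>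
    match pvSymbolAndTokenB ticker.toList with
    | none => pvLoopB rest out seen
    | some hit =>
      if PySem.Set.contains seen hit then pvLoopB rest out seen
      else pvLoopB rest (PySem.Dict.modify out hit.1 [] (fun xs => xs ++ [hit.2]))
             (PySem.Set.add seen hit)

def infer_polymarket_symbol_map_from_tickers_py_alt (market_tickers : List String) : List (String × List String) :=
  (pvLoopB market_tickers PySem.Dict.empty PySem.Set.empty).items

-- ===== PRECONDITION & SPEC =====
def Spec_infer_polymarket_symbol_map_from_tickers_py (market_tickers : List String) (out : List (String × List String)) : Prop := out = infer_polymarket_symbol_map_from_tickers_py_alt market_tickers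
instance (market_tickers : List String) (out : List (String × List String)) : Decidable (Spec_infer_polymarket_symbol_map_from_tickers_py market_tickers out) := by unfold Spec_infer_polymarket_symbol_map_from_tickers_py; infer_instance

-- ===== CLAIM (what is proved, stated in full; the proofs are below) =====
def Claim_equal_infer_polymarket_symbol_map_from_tickers_py : Prop := ∀ (market_tickers : List String), Dom_infer_polymarket_symbol_map_from_tickers_py market_tickers → Spec_infer_polymarket_symbol_map_from_tickers_py market_tickers (infer_polymarket_symbol_map_from_tickers_py market_tickers)

-- ===== LEMMAS AND PROOFS =====

theorem pv_itemsB : pvTableB.items =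
  [("KXBTC15M".toList, "btcusdt"), ("KXBTCD".toList, "btcusdt"), ("KXBTC".toList, "btcusdt"),
   ("KXETH15M".toList, "ethusdt"), ("KXETHD".toList, "ethusdt"), ("KXETH".toList, "ethusdt"),
   ("KXXRPD".toList, "xrpusdt"), ("KXXRP".toList, "xrpusdt"),
   ("KXSOLE".toList, "solusdt"), ("KXSOLD".toList, "solusdt"), ("KXSOL".toList, "solusdt")] := by
  decide

theorem pv_take_ne {l : List Char} {L : Nat} (k : List Char) (h : L ≤ l.length) (hk : k.length ≠ L) :
    l.take L ≠ k := by
  intro he; apply hk; rw [← he, List.length_take]; omega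

theorem pv_get8 (l : List Char) (h : 8 ≤ l.length) :
    pvTableB.get? (l.take 8) =
      if l.take 8 = "KXBTC15M".toList then some "btcusdt"
      else if l.take 8 = "KXETH15M".toList then some "ethusdt"
      else none := by
  split_ifs with h1 h2
  · rw [h1]; decide
  · rw [h2]; decide
  · have e_KXBTC15M : ("KXBTC15M".toList == l.take 8) = false := beq_eq_false_iff_ne.mpr (fun he => h1 he.symm)
    have e_KXBTCD : ("KXBTCD".toList == l.take 8) = false := beq_eq_false_iff_ne.mpr (fun he => pv_take_ne (l := l) (L := 8) _ h (by decide) he.symm)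
    have e_KXBTC : ("KXBTC".toList == l.take 8) = false := beq_eq_false_iff_ne.mpr (fun he => pv_take_ne (l := l) (L := 8) _ h (by decide) he.symm)
    have e_KXETH15M : ("KXETH15M".toList == l.take 8) = false := beq_eq_false_iff_ne.mpr (fun he => h2 he.symm)
    have e_KXETHD : ("KXETHD".toList == l.take 8) = false := beq_eq_false_iff_ne.mpr (fun he => pv_take_ne (l := l) (L := 8) _ h (by decide) he.symm)
    have e_KXETH : ("KXETH".toList == l.take 8) = false := beq_eq_false_iff_ne.mpr (fun he => pv_take_ne (l := l) (L := 8) _ h (by decide) he.symm)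
    have e_KXXRPD : ("KXXRPD".toList == l.take 8) = false := beq_eq_false_iff_ne.mpr (fun he => pv_take_ne (l := l) (L := 8) _ h (by decide) he.symm)
    have e_KXXRP : ("KXXRP".toList == l.take 8) = false := beq_eq_false_iff_ne.mpr (fun he => pv_take_ne (l := l) (L := 8) _ h (by decide) he.symm)
    have e_KXSOLE : ("KXSOLE".toList == l.take 8) = false := beq_eq_false_iff_ne.mpr (fun he => pv_take_ne (l := l) (L := 8) _ h (by decide) he.symm)
    have e_KXSOLD : ("KXSOLD".toList == l.take 8) = false := beq_eq_false_iff_ne.mpr (fun he => pv_take_ne (l := l) (L := 8) _ h (by decide) he.symm)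
    have e_KXSOL : ("KXSOL".toList == l.take 8) = false := beq_eq_false_iff_ne.mpr (fun he => pv_take_ne (l := l) (L := 8) _ h (by decide) he.symm)
    simp only [PySem.Dict.get?, pv_itemsB, List.find?, e_KXBTC15M, e_KXBTCD, e_KXBTC, e_KXETH15M, e_KXETHD, e_KXETH, e_KXXRPD, e_KXXRP, e_KXSOLE, e_KXSOLD, e_KXSOL]
    rfl

theorem pv_get6 (l : List Char) (h : 6 ≤ l.length) :
    pvTableB.get? (l.take 6) =
      if l.take 6 = "KXBTCD".toList then some "btcusdt"
      else if l.take 6 = "KXETHD".toList then some "ethusdt"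
      else if l.take 6 = "KXXRPD".toList then some "xrpusdt"
      else if l.take 6 = "KXSOLE".toList then some "solusdt"
      else if l.take 6 = "KXSOLD".toList then some "solusdt"
      else none := by
  split_ifs with h1 h2 h3 h4 h5
  · rw [h1]; decide
  · rw [h2]; decide
  · rw [h3]; decide
  · rw [h4]; decide
  · rw [h5]; decide
  · have e_KXBTC15M : ("KXBTC15M".toList == l.take 6) = false := beq_eq_false_iff_ne.mpr (fun he => pv_take_ne (l := l) (L := 6) _ h (by decide) he.symm)
    have e_KXBTCD : ("KXBTCD".toList == l.take 6) = false := beq_eq_false_iff_ne.mpr (fun he => h1 he.symm)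
    have e_KXBTC : ("KXBTC".toList == l.take 6) = false := beq_eq_false_iff_ne.mpr (fun he => pv_take_ne (l := l) (L := 6) _ h (by decide) he.symm)
    have e_KXETH15M : ("KXETH15M".toList == l.take 6) = false := beq_eq_false_iff_ne.mpr (fun he => pv_take_ne (l := l) (L := 6) _ h (by decide) he.symm)
    have e_KXETHD : ("KXETHD".toList == l.take 6) = false := beq_eq_false_iff_ne.mpr (fun he => h2 he.symm)
    have e_KXETH : ("KXETH".toList == l.take 6) = false := beq_eq_false_iff_ne.mpr (fun he => pv_take_ne (l := l) (L := 6) _ h (by decide) he.symm)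
    have e_KXXRPD : ("KXXRPD".toList == l.take 6) = false := beq_eq_false_iff_ne.mpr (fun he => h3 he.symm)
    have e_KXXRP : ("KXXRP".toList == l.take 6) = false := beq_eq_false_iff_ne.mpr (fun he => pv_take_ne (l := l) (L := 6) _ h (by decide) he.symm)
    have e_KXSOLE : ("KXSOLE".toList == l.take 6) = false := beq_eq_false_iff_ne.mpr (fun he => h4 he.symm)
    have e_KXSOLD : ("KXSOLD".toList == l.take 6) = false := beq_eq_false_iff_ne.mpr (fun he => h5 he.symm)
    have e_KXSOL : ("KXSOL".toList == l.take 6) = false := beq_eq_false_iff_ne.mpr (fun he => pv_take_ne (l := l) (L := 6) _ h (by decide) he.symm)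
    simp only [PySem.Dict.get?, pv_itemsB, List.find?, e_KXBTC15M, e_KXBTCD, e_KXBTC, e_KXETH15M, e_KXETHD, e_KXETH, e_KXXRPD, e_KXXRP, e_KXSOLE, e_KXSOLD, e_KXSOL]
    rfl

theorem pv_get5 (l : List Char) (h : 5 ≤ l.length) :
    pvTableB.get? (l.take 5) =
      if l.take 5 = "KXBTC".toList then some "btcusdt"
      else if l.take 5 = "KXETH".toList then some "ethusdt"
      else if l.take 5 = "KXXRP".toList then some "xrpusdt"
      else if l.take 5 = "KXSOL".toList then some "solusdt"
      else none := by
  split_ifs with h1 h2 h3 h4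
  · rw [h1]; decide
  · rw [h2]; decide
  · rw [h3]; decide
  · rw [h4]; decide
  · have e_KXBTC15M : ("KXBTC15M".toList == l.take 5) = false := beq_eq_false_iff_ne.mpr (fun he => pv_take_ne (l := l) (L := 5) _ h (by decide) he.symm)
    have e_KXBTCD : ("KXBTCD".toList == l.take 5) = false := beq_eq_false_iff_ne.mpr (fun he => pv_take_ne (l := l) (L := 5) _ h (by decide) he.symm)
    have e_KXBTC : ("KXBTC".toList == l.take 5) = false := beq_eq_false_iff_ne.mpr (fun he => h1 he.symm)
    have e_KXETH15M : ("KXETH15M".toList == l.take 5) = false := beq_eq_false_iff_ne.mpr (fun he => pv_take_ne (l := l) (L := 5) _ h (by decide) he.symm)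
    have e_KXETHD : ("KXETHD".toList == l.take 5) = false := beq_eq_false_iff_ne.mpr (fun he => pv_take_ne (l := l) (L := 5) _ h (by decide) he.symm)
    have e_KXETH : ("KXETH".toList == l.take 5) = false := beq_eq_false_iff_ne.mpr (fun he => h2 he.symm)
    have e_KXXRPD : ("KXXRPD".toList == l.take 5) = false := beq_eq_false_iff_ne.mpr (fun he => pv_take_ne (l := l) (L := 5) _ h (by decide) he.symm)
    have e_KXXRP : ("KXXRP".toList == l.take 5) = false := beq_eq_false_iff_ne.mpr (fun he => h3 he.symm)
    have e_KXSOLE : ("KXSOLE".toList == l.take 5) = false := beq_eq_false_iff_ne.mpr (fun he => pv_take_ne (l := l) (L := 5) _ h (by decide) he.symm)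
    have e_KXSOLD : ("KXSOLD".toList == l.take 5) = false := beq_eq_false_iff_ne.mpr (fun he => pv_take_ne (l := l) (L := 5) _ h (by decide) he.symm)
    have e_KXSOL : ("KXSOL".toList == l.take 5) = false := beq_eq_false_iff_ne.mpr (fun he => h4 he.symm)
    simp only [PySem.Dict.get?, pv_itemsB, List.find?, e_KXBTC15M, e_KXBTCD, e_KXBTC, e_KXETH15M, e_KXETHD, e_KXETH, e_KXXRPD, e_KXXRP, e_KXSOLE, e_KXSOLD, e_KXSOL]
    rfl

theorem pv_get_dead (l : List Char) (L : Nat) (hL : L ≤ l.length)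
    (h8 : L ≠ 8) (h6 : L ≠ 6) (h5 : L ≠ 5) : pvTableB.get? (l.take L) = none := by
  have e_KXBTC15M : ("KXBTC15M".toList == l.take L) = false := beq_eq_false_iff_ne.mpr (fun he => pv_take_ne (l := l) (L := L) _ hL (by rw [show ("KXBTC15M".toList).length = 8 from rfl]; omega) he.symm)
  have e_KXBTCD : ("KXBTCD".toList == l.take L) = false := beq_eq_false_iff_ne.mpr (fun he => pv_take_ne (l := l) (L := L) _ hL (by rw [show ("KXBTCD".toList).length = 6 from rfl]; omega) he.symm)
  have e_KXBTC : ("KXBTC".toList == l.take L) = false := beq_eq_false_iff_ne.mpr (fun he => pv_take_ne (l := l) (L := L) _ hL (by rw [show ("KXBTC".toList).length = 5 from rfl]; omega) he.symm)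
  have e_KXETH15M : ("KXETH15M".toList == l.take L) = false := beq_eq_false_iff_ne.mpr (fun he => pv_take_ne (l := l) (L := L) _ hL (by rw [show ("KXETH15M".toList).length = 8 from rfl]; omega) he.symm)
  have e_KXETHD : ("KXETHD".toList == l.take L) = false := beq_eq_false_iff_ne.mpr (fun he => pv_take_ne (l := l) (L := L) _ hL (by rw [show ("KXETHD".toList).length = 6 from rfl]; omega) he.symm)
  have e_KXETH : ("KXETH".toList == l.take L) = false := beq_eq_false_iff_ne.mpr (fun he => pv_take_ne (l := l) (L := L) _ hL (by rw [show ("KXETH".toList).length = 5 from rfl]; omega) he.symm)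
  have e_KXXRPD : ("KXXRPD".toList == l.take L) = false := beq_eq_false_iff_ne.mpr (fun he => pv_take_ne (l := l) (L := L) _ hL (by rw [show ("KXXRPD".toList).length = 6 from rfl]; omega) he.symm)
  have e_KXXRP : ("KXXRP".toList == l.take L) = false := beq_eq_false_iff_ne.mpr (fun he => pv_take_ne (l := l) (L := L) _ hL (by rw [show ("KXXRP".toList).length = 5 from rfl]; omega) he.symm)
  have e_KXSOLE : ("KXSOLE".toList == l.take L) = false := beq_eq_false_iff_ne.mpr (fun he => pv_take_ne (l := l) (L := L) _ hL (by rw [show ("KXSOLE".toList).length = 6 from rfl]; omega) he.symm)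
  have e_KXSOLD : ("KXSOLD".toList == l.take L) = false := beq_eq_false_iff_ne.mpr (fun he => pv_take_ne (l := l) (L := L) _ hL (by rw [show ("KXSOLD".toList).length = 6 from rfl]; omega) he.symm)
  have e_KXSOL : ("KXSOL".toList == l.take L) = false := beq_eq_false_iff_ne.mpr (fun he => pv_take_ne (l := l) (L := L) _ hL (by rw [show ("KXSOL".toList).length = 5 from rfl]; omega) he.symm)
  simp only [PySem.Dict.get?, pv_itemsB, List.find?, e_KXBTC15M, e_KXBTCD, e_KXBTC, e_KXETH15M, e_KXETHD, e_KXETH, e_KXXRPD, e_KXXRP, e_KXSOLE, e_KXSOLD, e_KXSOL]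
  rfl

theorem pv_sw_iff (l p : List Char) : PySem.Chars.startswith l p = true ↔ l.take p.length = p := by
  rw [show PySem.Chars.startswith l p = p.isPrefixOf l from rfl, List.isPrefixOf_iff_prefix,
      List.prefix_iff_eq_take]
  exact eq_comm

theorem pv_sw_false_long (l p : List Char) (h : l.length < p.length) :
    PySem.Chars.startswith l p = false := by
  rw [Bool.eq_false_iff]
  intro hb
  have := ((pv_sw_iff l p).mp hb)
  have hl := congrArg List.length this
  rw [List.length_take] at hl
  omega

theorem pv_slice_take (l : List Char) (L : Int) (h : 0 ≤ L) :
    PySem.Chars.slice l none (some L) = l.take L.toNat := by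
  rw [PySem.Chars.slice_eq_listSlice, PySem.List.slice_to _ h]

theorem pv_tail5 (l : List Char) (h : 5 ≤ l.length) :
    pvProbeB l [5, 4, 3, 2, 1]
      = (pvScanA l ["KXBTC".toList, "KXETH".toList, "KXXRP".toList, "KXSOL".toList]).map
          (fun s => (s, String.ofList l)) := by
  simp only [pvProbeB, pvScanA, pv_slice_take _ _ (by omega : (0:Int) ≤ 5),
    pv_slice_take _ _ (by omega : (0:Int) ≤ 4), pv_slice_take _ _ (by omega : (0:Int) ≤ 3),
    pv_slice_take _ _ (by omega : (0:Int) ≤ 2), pv_slice_take _ _ (by omega : (0:Int) ≤ 1),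
    show ((5:Int).toNat) = 5 from rfl, show ((4:Int).toNat) = 4 from rfl,
    show ((3:Int).toNat) = 3 from rfl, show ((2:Int).toNat) = 2 from rfl,
    show ((1:Int).toNat) = 1 from rfl]
  rw [pv_get5 l h, pv_get_dead l 4 (by omega) (by omega) (by omega) (by omega),
      pv_get_dead l 3 (by omega) (by omega) (by omega) (by omega),
      pv_get_dead l 2 (by omega) (by omega) (by omega) (by omega),
      pv_get_dead l 1 (by omega) (by omega) (by omega) (by omega)]
  simp only [pv_sw_iff, show ("KXBTC".toList).length = 5 from rfl,
    show ("KXETH".toList).length = 5 from rfl, show ("KXXRP".toList).length = 5 from rfl,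
    show ("KXSOL".toList).length = 5 from rfl]
  by_cases h1 : l.take 5 = "KXBTC".toList
  · rw [if_pos h1, if_pos h1]; simp; decide
  · rw [if_neg h1, if_neg h1]
    by_cases h2 : l.take 5 = "KXETH".toList
    · rw [if_pos h2, if_pos h2]; simp; decide
    · rw [if_neg h2, if_neg h2]
      by_cases h3 : l.take 5 = "KXXRP".toList
      · rw [if_pos h3, if_pos h3]; simp; decide
      · rw [if_neg h3, if_neg h3]
        by_cases h4 : l.take 5 = "KXSOL".toList
        · rw [if_pos h4, if_pos h4]; simp; decide
        · rw [if_neg h4, if_neg h4]; rfl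

theorem pv_sw_not (l p : List Char) (h : l.length < p.length) :
    ¬ (PySem.Chars.startswith l p = true) := by
  rw [pv_sw_false_long l p h]; simp

theorem pv_tail6 (l : List Char) (h : 6 ≤ l.length) :
    pvProbeB l [6, 5, 4, 3, 2, 1]
      = (pvScanA l ["KXBTCD".toList, "KXETHD".toList, "KXXRPD".toList, "KXSOLE".toList, "KXSOLD".toList, "KXBTC".toList, "KXETH".toList, "KXXRP".toList, "KXSOL".toList]).map (fun s => (s, String.ofList l)) := by
  rw [pvProbeB, pv_slice_take _ _ (by omega), show ((6:Int).toNat) = 6 from rfl, pv_get6 l h]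
  by_cases h1 : l.take 6 = "KXBTCD".toList
  · rw [if_pos h1, pvScanA, if_pos ((pv_sw_iff l "KXBTCD".toList).mpr h1)]
    simp; decide
  · rw [if_neg h1]
    by_cases h2 : l.take 6 = "KXETHD".toList
    · rw [if_pos h2, pvScanA, if_neg (fun hb => h1 ((pv_sw_iff l "KXBTCD".toList).mp hb)), pvScanA, if_pos ((pv_sw_iff l "KXETHD".toList).mpr h2)]
      simp; decide
    · rw [if_neg h2]
      by_cases h3 : l.take 6 = "KXXRPD".toList
      · rw [if_pos h3, pvScanA, if_neg (fun hb => h1 ((pv_sw_iff l "KXBTCD".toList).mp hb)), pvScanA, if_neg (fun hb => h2 ((pv_sw_iff l "KXETHD".toList).mp hb)), pvScanA, if_pos ((pv_sw_iff l "KXXRPD".toList).mpr h3)]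
        simp; decide
      · rw [if_neg h3]
        by_cases h4 : l.take 6 = "KXSOLE".toList
        · rw [if_pos h4, pvScanA, if_neg (fun hb => h1 ((pv_sw_iff l "KXBTCD".toList).mp hb)), pvScanA, if_neg (fun hb => h2 ((pv_sw_iff l "KXETHD".toList).mp hb)), pvScanA, if_neg (fun hb => h3 ((pv_sw_iff l "KXXRPD".toList).mp hb)), pvScanA, if_pos ((pv_sw_iff l "KXSOLE".toList).mpr h4)]
          simp; decide
        · rw [if_neg h4]
          by_cases h5 : l.take 6 = "KXSOLD".toList
          · rw [if_pos h5, pvScanA, if_neg (fun hb => h1 ((pv_sw_iff l "KXBTCD".toList).mp hb)), pvScanA, if_neg (fun hb => h2 ((pv_sw_iff l "KXETHD".toList).mp hb)), pvScanA, if_neg (fun hb => h3 ((pv_sw_iff l "KXXRPD".toList).mp hb)), pvScanA, if_neg (fun hb => h4 ((pv_sw_iff l "KXSOLE".toList).mp hb)), pvScanA, if_pos ((pv_sw_iff l "KXSOLD".toList).mpr h5)]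
            simp; decide
          · rw [if_neg h5, pvScanA, if_neg (fun hb => h1 ((pv_sw_iff l "KXBTCD".toList).mp hb)), pvScanA, if_neg (fun hb => h2 ((pv_sw_iff l "KXETHD".toList).mp hb)), pvScanA, if_neg (fun hb => h3 ((pv_sw_iff l "KXXRPD".toList).mp hb)), pvScanA, if_neg (fun hb => h4 ((pv_sw_iff l "KXSOLE".toList).mp hb)), pvScanA, if_neg (fun hb => h5 ((pv_sw_iff l "KXSOLD".toList).mp hb))]
            exact pv_tail5 l (by omega)

theorem pv_coreEq (l : List Char) :
    pvProbeB l (PySem.List.pyRange (min (l.length : Int) 8) 0 (-1))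
      = (pvScanA l ["KXBTC15M".toList, "KXETH15M".toList, "KXBTCD".toList, "KXETHD".toList, "KXXRPD".toList, "KXSOLE".toList, "KXSOLD".toList, "KXBTC".toList, "KXETH".toList, "KXXRP".toList, "KXSOL".toList]).map (fun s => (s, String.ofList l)) := by
  rcases Nat.lt_or_ge l.length 8 with h8 | h8
  · interval_cases hn : l.length
    · -- l.length = 0
      rw [show min (((0:Nat)):Int) 8 = 0 from by decide, show PySem.List.pyRange 0 0 (-1) = [] from by decide]
      rw [pvScanA, if_neg (pv_sw_not l "KXBTC15M".toList (by rw [hn, show ("KXBTC15M".toList).length = 8 from rfl]; omega)), pvScanA, if_neg (pv_sw_not l "KXETH15M".toList (by rw [hn, show ("KXETH15M".toList).length = 8 from rfl]; omega)), pvScanA, if_neg (pv_sw_not l "KXBTCD".toList (by rw [hn, show ("KXBTCD".toList).length = 6 from rfl]; omega)), pvScanA, if_neg (pv_sw_not l "KXETHD".toList (by rw [hn, show ("KXETHD".toList).length = 6 from rfl]; omega)), pvScanA, if_neg (pv_sw_not l "KXXRPD".toList (by rw [hn, show ("KXXRPD".toList).length = 6 from rfl]; omega)), pvScanA, if_neg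 (pv_sw_not l "KXSOLE".toList (by rw [hn, show ("KXSOLE".toList).length = 6 from rfl]; omega)), pvScanA, if_neg (pv_sw_not l "KXSOLD".toList (by rw [hn, show ("KXSOLD".toList).length = 6 from rfl]; omega)), pvScanA, if_neg (pv_sw_not l "KXBTC".toList (by rw [hn, show ("KXBTC".toList).length = 5 from rfl]; omega)), pvScanA, if_neg (pv_sw_not l "KXETH".toList (by rw [hn, show ("KXETH".toList).length = 5 from rfl]; omega)), pvScanA, if_neg (pv_sw_not l "KXXRP".toList (by rw [hn, show ("KXXRP".toList).length = 5 from rfl]; omega)), pvScanA, if_neg (pv_sw_not l "KXSOL".toList (by rw [hn, show ("KXSOL".toList).length = 5 from rfl]; omega))]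
      rfl
    · -- l.length = 1
      rw [show min (((1:Nat)):Int) 8 = 1 from by decide, show PySem.List.pyRange 1 0 (-1) = [1] from by decide]
      rw [pvProbeB, pv_slice_take _ _ (by omega), show ((1:Int).toNat) = 1 from rfl, pv_get_dead l 1 (by omega) (by omega) (by omega) (by omega)]
      rw [pvScanA, if_neg (pv_sw_not l "KXBTC15M".toList (by rw [hn, show ("KXBTC15M".toList).length = 8 from rfl]; omega)), pvScanA, if_neg (pv_sw_not l "KXETH15M".toList (by rw [hn, show ("KXETH15M".toList).length = 8 from rfl]; omega)), pvScanA, if_neg (pv_sw_not l "KXBTCD".toList (by rw [hn, show ("KXBTCD".toList).length = 6 from rfl]; omega)), pvScanA, if_neg (pv_sw_not l "KXETHD".toList (by rw [hn, show ("KXETHD".toList).length = 6 from rfl]; omega)), pvScanA, if_neg (pv_sw_not l "KXXRPD".toList (by rw [hn, show ("KXXRPD".toList).length = 6 from rfl]; omega)), pvScanA, if_neg (pv_sw_not l "KXSOLE".toList (by rw [hn, show ("KXSOLE".toList).length = 6 from rfl]; omega)), pvScanA, if_neg (pv_sw_not l "KXSOLD".toList (by rw [hn, show ("KXSOLD".toList).length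 = 6 from rfl]; omega)), pvScanA, if_neg (pv_sw_not l "KXBTC".toList (by rw [hn, show ("KXBTC".toList).length = 5 from rfl]; omega)), pvScanA, if_neg (pv_sw_not l "KXETH".toList (by rw [hn, show ("KXETH".toList).length = 5 from rfl]; omega)), pvScanA, if_neg (pv_sw_not l "KXXRP".toList (by rw [hn, show ("KXXRP".toList).length = 5 from rfl]; omega)), pvScanA, if_neg (pv_sw_not l "KXSOL".toList (by rw [hn, show ("KXSOL".toList).length = 5 from rfl]; omega))]
      rfl
    · -- l.length = 2
      rw [show min (((2:Nat)):Int) 8 = 2 from by decide, show PySem.List.pyRange 2 0 (-1) = [2, 1] from by decide]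
      rw [pvProbeB, pv_slice_take _ _ (by omega), show ((2:Int).toNat) = 2 from rfl, pv_get_dead l 2 (by omega) (by omega) (by omega) (by omega), pvProbeB, pv_slice_take _ _ (by omega), show ((1:Int).toNat) = 1 from rfl, pv_get_dead l 1 (by omega) (by omega) (by omega) (by omega)]
      rw [pvScanA, if_neg (pv_sw_not l "KXBTC15M".toList (by rw [hn, show ("KXBTC15M".toList).length = 8 from rfl]; omega)), pvScanA, if_neg (pv_sw_not l "KXETH15M".toList (by rw [hn, show ("KXETH15M".toList).length = 8 from rfl]; omega)), pvScanA, if_neg (pv_sw_not l "KXBTCD".toList (by rw [hn, show ("KXBTCD".toList).length = 6 from rfl]; omega)), pvScanA, if_neg (pv_sw_not l "KXETHD".toList (by rw [hn, show ("KXETHD".toList).length = 6 from rfl]; omega)), pvScanA, if_neg (pv_sw_not l "KXXRPD".toList (by rw [hn, show ("KXXRPD".toList).length = 6 from rfl]; omega)), pvScanA, if_neg (pv_sw_not l "KXSOLE".toList (by rw [hn, show ("KXSOLE".toList).length = 6 from rfl]; omega)), pvScanA, if_neg (pv_sw_not l "KXSOLD".toList (by rw [hn, show ("KXSOLD".toList).length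 = 6 from rfl]; omega)), pvScanA, if_neg (pv_sw_not l "KXBTC".toList (by rw [hn, show ("KXBTC".toList).length = 5 from rfl]; omega)), pvScanA, if_neg (pv_sw_not l "KXETH".toList (by rw [hn, show ("KXETH".toList).length = 5 from rfl]; omega)), pvScanA, if_neg (pv_sw_not l "KXXRP".toList (by rw [hn, show ("KXXRP".toList).length = 5 from rfl]; omega)), pvScanA, if_neg (pv_sw_not l "KXSOL".toList (by rw [hn, show ("KXSOL".toList).length = 5 from rfl]; omega))]
      rfl
    · -- l.length = 3
      rw [show min (((3:Nat)):Int) 8 = 3 from by decide, show PySem.List.pyRange 3 0 (-1) = [3, 2, 1] from by decide]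
      rw [pvProbeB, pv_slice_take _ _ (by omega), show ((3:Int).toNat) = 3 from rfl, pv_get_dead l 3 (by omega) (by omega) (by omega) (by omega), pvProbeB, pv_slice_take _ _ (by omega), show ((2:Int).toNat) = 2 from rfl, pv_get_dead l 2 (by omega) (by omega) (by omega) (by omega), pvProbeB, pv_slice_take _ _ (by omega), show ((1:Int).toNat) = 1 from rfl, pv_get_dead l 1 (by omega) (by omega) (by omega) (by omega)]
      rw [pvScanA, if_neg (pv_sw_not l "KXBTC15M".toList (by rw [hn, show ("KXBTC15M".toList).length = 8 from rfl]; omega)), pvScanA, if_neg (pv_sw_not l "KXETH15M".toList (by rw [hn, show ("KXETH15M".toList).length = 8 from rfl]; omega)), pvScanA, if_neg (pv_sw_not l "KXBTCD".toList (by rw [hn, show ("KXBTCD".toList).length = 6 from rfl]; omega)), pvScanA, if_neg (pv_sw_not l "KXETHD".toList (by rw [hn, show ("KXETHD".toList).length = 6 from rfl]; omega)), pvScanA, if_neg (pv_sw_not l "KXXRPD".toList (by rw [hn, show ("KXXRPD".toList).length = 6 from rfl]; omega)), pvScanA, if_neg (pv_sw_not l "KXSOLE".toList (by rw [hn, show ("KXSOLE".toList).length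 = 6 from rfl]; omega)), pvScanA, if_neg (pv_sw_not l "KXSOLD".toList (by rw [hn, show ("KXSOLD".toList).length = 6 from rfl]; omega)), pvScanA, if_neg (pv_sw_not l "KXBTC".toList (by rw [hn, show ("KXBTC".toList).length = 5 from rfl]; omega)), pvScanA, if_neg (pv_sw_not l "KXETH".toList (by rw [hn, show ("KXETH".toList).length = 5 from rfl]; omega)), pvScanA, if_neg (pv_sw_not l "KXXRP".toList (by rw [hn, show ("KXXRP".toList).length = 5 from rfl]; omega)), pvScanA, if_neg (pv_sw_not l "KXSOL".toList (by rw [hn, show ("KXSOL".toList).length = 5 from rfl]; omega))]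
      rfl
    · -- l.length = 4
      rw [show min (((4:Nat)):Int) 8 = 4 from by decide, show PySem.List.pyRange 4 0 (-1) = [4, 3, 2, 1] from by decide]
      rw [pvProbeB, pv_slice_take _ _ (by omega), show ((4:Int).toNat) = 4 from rfl, pv_get_dead l 4 (by omega) (by omega) (by omega) (by omega), pvProbeB, pv_slice_take _ _ (by omega), show ((3:Int).toNat) = 3 from rfl, pv_get_dead l 3 (by omega) (by omega) (by omega) (by omega), pvProbeB, pv_slice_take _ _ (by omega), show ((2:Int).toNat) = 2 from rfl, pv_get_dead l 2 (by omega) (by omega) (by omega) (by omega), pvProbeB, pv_slice_take _ _ (by omega), show ((1:Int).toNat) = 1 from rfl, pv_get_dead l 1 (by omega) (by omega) (by omega) (by omega)]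
      rw [pvScanA, if_neg (pv_sw_not l "KXBTC15M".toList (by rw [hn, show ("KXBTC15M".toList).length = 8 from rfl]; omega)), pvScanA, if_neg (pv_sw_not l "KXETH15M".toList (by rw [hn, show ("KXETH15M".toList).length = 8 from rfl]; omega)), pvScanA, if_neg (pv_sw_not l "KXBTCD".toList (by rw [hn, show ("KXBTCD".toList).length = 6 from rfl]; omega)), pvScanA, if_neg (pv_sw_not l "KXETHD".toList (by rw [hn, show ("KXETHD".toList).length = 6 from rfl]; omega)), pvScanA, if_neg (pv_sw_not l "KXXRPD".toList (by rw [hn, show ("KXXRPD".toList).length = 6 from rfl]; omega)), pvScanA, if_neg (pv_sw_not l "KXSOLE".toList (by rw [hn, show ("KXSOLE".toList).length = 6 from rfl]; omega)), pvScanA, if_neg (pv_sw_not l "KXSOLD".toList (by rw [hn, show ("KXSOLD".toList).length = 6 from rfl]; omega)), pvScanA, if_neg (pv_sw_not l "KXBTC".toList (by rw [hn, show ("KXBTC".toList).length = 5 from rfl]; omega)), pvScanA, if_neg (pv_sw_not l "KXETH".toList (by rw [hn, show ("KXETH".toList).length = 5 from rfl]; omega)), pvScanA, if_neg (pv_sw_not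 l "KXXRP".toList (by rw [hn, show ("KXXRP".toList).length = 5 from rfl]; omega)), pvScanA, if_neg (pv_sw_not l "KXSOL".toList (by rw [hn, show ("KXSOL".toList).length = 5 from rfl]; omega))]
      rfl
    · -- l.length = 5
      rw [show min (((5:Nat)):Int) 8 = 5 from by decide, show PySem.List.pyRange 5 0 (-1) = [5, 4, 3, 2, 1] from by decide]
      rw [pvScanA, if_neg (pv_sw_not l "KXBTC15M".toList (by rw [hn, show ("KXBTC15M".toList).length = 8 from rfl]; omega)), pvScanA, if_neg (pv_sw_not l "KXETH15M".toList (by rw [hn, show ("KXETH15M".toList).length = 8 from rfl]; omega)), pvScanA, if_neg (pv_sw_not l "KXBTCD".toList (by rw [hn, show ("KXBTCD".toList).length = 6 from rfl]; omega)), pvScanA, if_neg (pv_sw_not l "KXETHD".toList (by rw [hn, show ("KXETHD".toList).length = 6 from rfl]; omega)), pvScanA, if_neg (pv_sw_not l "KXXRPD".toList (by rw [hn, show ("KXXRPD".toList).length = 6 from rfl]; omega)), pvScanA, if_neg (pv_sw_not l "KXSOLE".toList (by rw [hn, show ("KXSOLE".toList).length = 6 from rfl]; omega)), pvScanA, if_neg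 (pv_sw_not l "KXSOLD".toList (by rw [hn, show ("KXSOLD".toList).length = 6 from rfl]; omega))]
      exact pv_tail5 l (by omega)
    · -- l.length = 6
      rw [show min (((6:Nat)):Int) 8 = 6 from by decide, show PySem.List.pyRange 6 0 (-1) = [6, 5, 4, 3, 2, 1] from by decide]
      rw [pvScanA, if_neg (pv_sw_not l "KXBTC15M".toList (by rw [hn, show ("KXBTC15M".toList).length = 8 from rfl]; omega)), pvScanA, if_neg (pv_sw_not l "KXETH15M".toList (by rw [hn, show ("KXETH15M".toList).length = 8 from rfl]; omega))]
      exact pv_tail6 l (by omega)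
    · -- l.length = 7
      rw [show min (((7:Nat)):Int) 8 = 7 from by decide, show PySem.List.pyRange 7 0 (-1) = [7, 6, 5, 4, 3, 2, 1] from by decide]
      rw [pvProbeB, pv_slice_take _ _ (by omega), show ((7:Int).toNat) = 7 from rfl,
          pv_get_dead l 7 (by omega) (by omega) (by omega) (by omega)]
      rw [pvScanA, if_neg (pv_sw_not l "KXBTC15M".toList (by rw [hn, show ("KXBTC15M".toList).length = 8 from rfl]; omega)), pvScanA, if_neg (pv_sw_not l "KXETH15M".toList (by rw [hn, show ("KXETH15M".toList).length = 8 from rfl]; omega))]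
      exact pv_tail6 l (by omega)

  · have hm : min ((l.length : Int)) 8 = 8 := by omega
    rw [hm, show PySem.List.pyRange 8 0 (-1) = [8, 7, 6, 5, 4, 3, 2, 1] from by decide]
    rw [pvProbeB, pv_slice_take _ _ (by omega), show ((8:Int).toNat) = 8 from rfl, pv_get8 l h8]
    by_cases h1 : l.take 8 = "KXBTC15M".toList
    · rw [if_pos h1, pvScanA, if_pos ((pv_sw_iff l "KXBTC15M".toList).mpr h1)]
      simp; decide
    · rw [if_neg h1]
      by_cases h2 : l.take 8 = "KXETH15M".toList
      · rw [if_pos h2, pvScanA, if_neg (fun hb => h1 ((pv_sw_iff l "KXBTC15M".toList).mp hb)), pvScanA, if_pos ((pv_sw_iff l "KXETH15M".toList).mpr h2)]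
        simp; decide
      · rw [if_neg h2, pvProbeB, pv_slice_take _ _ (by omega), show ((7:Int).toNat) = 7 from rfl,
            pv_get_dead l 7 (by omega) (by omega) (by omega) (by omega),
            pvScanA, if_neg (fun hb => h1 ((pv_sw_iff l "KXBTC15M".toList).mp hb)),
            pvScanA, if_neg (fun hb => h2 ((pv_sw_iff l "KXETH15M".toList).mp hb))]
        exact pv_tail6 l (by omega)

theorem pv_isspace_false (c : Char) (h1 : 33 ≤ c.toNat) (h2 : c.toNat ≤ 126) :
    PySem.Chars.isspace c = false := by
  unfold PySem.Chars.isspace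
  simp only [Bool.or_eq_false_iff, Bool.and_eq_false_iff, decide_eq_false_iff_not]
  omega

theorem pv_isspace_upperChar (c : Char) :
    PySem.Chars.isspace (PySem.Chars.upperChar c) = PySem.Chars.isspace c := by
  unfold PySem.Chars.upperChar PySem.Chars.islower
  split
  · rename_i h
    simp only [decide_eq_true_eq, Bool.and_eq_true] at h
    have h1 : (97:Nat) ≤ c.toNat := h.1
    have h2 : c.toNat ≤ 122 := h.2
    have hv : (c.toNat - 32).isValidChar := by constructor; omega
    have ht : (Char.ofNat (c.toNat - 32)).toNat = c.toNat - 32 := by simp [Char.ofNat, hv]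
    rw [pv_isspace_false _ (by omega) (by omega), pv_isspace_false _ (by omega) (by omega)]
  · rfl

theorem pv_upperChar_idem (c : Char) :
    PySem.Chars.upperChar (PySem.Chars.upperChar c) = PySem.Chars.upperChar c := by
  unfold PySem.Chars.upperChar PySem.Chars.islower
  split
  · rename_i h
    simp only [decide_eq_true_eq, Bool.and_eq_true] at h
    have h1 : (97:Nat) ≤ c.toNat := h.1
    have h2 : c.toNat ≤ 122 := h.2
    have hv : (c.toNat - 32).isValidChar := by constructor; omega
    have ht : (Char.ofNat (c.toNat - 32)).toNat = c.toNat - 32 := by simp [Char.ofNat, hv]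
    rw [if_neg]
    simp only [decide_eq_true_eq, Bool.and_eq_true, not_and]
    intro ha
    exfalso
    have ha' : (97:Nat) ≤ (Char.ofNat (c.toNat - 32)).toNat := ha
    omega
  · rfl

theorem pv_upper_upper (s : List Char) :
    PySem.Chars.upper (PySem.Chars.upper s) = PySem.Chars.upper s := by
  unfold PySem.Chars.upper
  rw [List.map_map]
  exact List.map_congr_left (fun c _ => pv_upperChar_idem c)

theorem pv_strip_upper (s : List Char) :
    PySem.Chars.strip (PySem.Chars.upper s) = PySem.Chars.upper (PySem.Chars.strip s) := by
  have key : (PySem.Chars.isspace ∘ PySem.Chars.upperChar) = PySem.Chars.isspace := by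
    funext c; exact pv_isspace_upperChar c
  unfold PySem.Chars.strip PySem.Chars.lstrip PySem.Chars.rstrip PySem.Chars.upper
  rw [List.dropWhile_map, key, ← List.map_reverse, List.dropWhile_map, key, ← List.map_reverse]

theorem pv_lstrip_rstrip_lstrip (s : List Char) :
    PySem.Chars.lstrip (PySem.Chars.rstrip (PySem.Chars.lstrip s))
      = PySem.Chars.rstrip (PySem.Chars.lstrip s) := by
  unfold PySem.Chars.lstrip PySem.Chars.rstrip
  set p := PySem.Chars.isspace
  set z := List.dropWhile p s with hz
  set z' := (List.dropWhile p z.reverse).reverse with hz'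
  have hpref : z' <+: z := by
    rw [← List.reverse_reverse z]
    exact List.reverse_prefix.mpr (List.dropWhile_suffix p)
  have hidem : List.dropWhile p z = z := by rw [hz]; exact List.dropWhile_idempotent p s
  rw [List.dropWhile_eq_self_iff]
  intro hl
  have hlz : 0 < z.length := lt_of_lt_of_le hl hpref.length_le
  have h0 : z'[0] = z[0] := List.IsPrefix.getElem hpref hl
  rw [h0]
  exact (List.dropWhile_eq_self_iff.mp hidem) hlz

theorem pv_strip_idem (s : List Char) :
    PySem.Chars.strip (PySem.Chars.strip s) = PySem.Chars.strip s := by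
  show PySem.Chars.rstrip (PySem.Chars.lstrip (PySem.Chars.rstrip (PySem.Chars.lstrip s)))
      = PySem.Chars.rstrip (PySem.Chars.lstrip s)
  rw [pv_lstrip_rstrip_lstrip]
  unfold PySem.Chars.rstrip
  rw [List.reverse_reverse, List.dropWhile_idempotent]

theorem pv_norm_idem (s : List Char) :
    PySem.Chars.upper (PySem.Chars.strip (PySem.Chars.upper (PySem.Chars.strip s)))
      = PySem.Chars.upper (PySem.Chars.strip s) := by
  rw [pv_strip_upper, pv_strip_idem, pv_upper_upper]

theorem pv_sortedEq :
    PySem.List.sorted pvTableA.keys (fun k => PySem.Chars.len k) true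
      = ["KXBTC15M".toList, "KXETH15M".toList, "KXBTCD".toList, "KXETHD".toList, "KXXRPD".toList,
         "KXSOLE".toList, "KXSOLD".toList, "KXBTC".toList, "KXETH".toList, "KXXRP".toList, "KXSOL".toList] := by
  decide

theorem pv_maxLenEq : pvMaxPrefixLen = 8 := by decide

theorem pv_hitEq (x : List Char) :
    pvSymbolAndTokenB x
      = (pvSymbolForA (PySem.Chars.upper (PySem.Chars.strip x))).map
          (fun s => (s, String.ofList (PySem.Chars.upper (PySem.Chars.strip x)))) := by
  unfold pvSymbolAndTokenB pvSymbolForA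
  rw [pv_maxLenEq, pv_norm_idem, pv_sortedEq]
  set t := PySem.Chars.upper (PySem.Chars.strip x) with ht
  by_cases he : t = []
  · rw [if_pos he, he]
    exact (pv_coreEq []).trans (by decide)
  · rw [if_neg he]
    exact pv_coreEq t

theorem pv_scan_ne (l : List Char) (s : String) :
    ∀ ps : List (List Char), (∀ p ∈ ps, pvTableA.getD p "" ≠ "") →
      pvScanA l ps = some s → s ≠ "" := by
  intro ps
  induction ps with
  | nil => intro _ h; cases h
  | cons p rest ih =>
    intro hall h
    rw [pvScanA] at h
    by_cases hc : PySem.Chars.startswith l p = true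
    · rw [if_pos hc] at h
      cases h
      exact hall p (List.mem_cons_self)
    · rw [if_neg hc] at h
      exact ih (fun q hq => hall q (List.mem_cons_of_mem _ hq)) h

theorem pv_valNe (x : List Char) (s : String) (h : pvSymbolForA x = some s) : s ≠ "" := by
  unfold pvSymbolForA at h
  rw [pv_sortedEq] at h
  by_cases he : PySem.Chars.upper (PySem.Chars.strip x) = []
  · rw [if_pos he] at h; cases h
  · rw [if_neg he] at h
    exact pv_scan_ne _ _ _ (by decide) h

theorem pv_setdefault_getD (out : PySem.Dict String (List String)) (s a : String) :
    (out.setdefault s []).getD a [] = out.getD a [] := by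
  unfold PySem.Dict.setdefault
  split
  · rfl
  · unfold PySem.Dict.getD PySem.Dict.get?
    show (Option.map _ (List.find? _ (out.items ++ [(s, [])]))).getD [] = _
    rw [List.find?_append]
    cases hf : List.find? (fun p => p.1 == a) out.items with
    | some v => simp [Option.or]
    | none =>
      by_cases hsa : (s == a) = true
      · simp [Option.or, List.find?, hsa]
      · simp [Option.or, List.find?, hsa]

theorem pv_contains_of_mem_getD (out : PySem.Dict String (List String)) (a : String) (b : String)
    (h : b ∈ out.getD a []) : out.contains a = true := by
  by_contra hc
  have hn : List.find? (fun p => p.1 == a) out.items = none := by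
    rw [List.find?_eq_none]
    intro x hx hp
    exact hc (List.any_eq_true.mpr ⟨x, hx, hp⟩)
  unfold PySem.Dict.getD PySem.Dict.get? at h
  rw [hn] at h
  simp at h

theorem pv_setdefault_of_contains (out : PySem.Dict String (List String)) (s : String)
    (h : out.contains s = true) : out.setdefault s [] = out := by
  unfold PySem.Dict.setdefault
  rw [if_pos h]

theorem pv_stepEq (out : PySem.Dict String (List String)) (s : String) (t : String) :
    (out.setdefault s []).insert s ((out.setdefault s []).getD s [] ++ [t])
      = PySem.Dict.modify out s [] (fun xs => xs ++ [t]) := by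
  unfold PySem.Dict.modify
  rw [pv_setdefault_getD]
  by_cases hc : out.contains s = true
  · rw [pv_setdefault_of_contains out s hc]
  · have h1 : (PySem.Dict.mk (out.items ++ [(s, ([] : List String))])).contains s = true := by
      unfold PySem.Dict.contains; simp
    unfold PySem.Dict.setdefault
    rw [if_neg hc]
    unfold PySem.Dict.insert
    rw [if_pos h1, if_neg hc]
    have hnone : ∀ p ∈ out.items, ¬ (p.1 == s) = true :=
      fun p hp hb => hc (List.any_eq_true.mpr ⟨p, hp, hb⟩)
    congr 1
    show (out.items ++ [(s, ([] : List String))]).map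
        (fun p => if (p.1 == s) = true then (s, out.getD s [] ++ [t]) else p)
      = out.items ++ [(s, out.getD s [] ++ [t])]
    rw [List.map_append]
    congr 1
    · calc out.items.map (fun p => if (p.1 == s) = true then (s, out.getD s [] ++ [t]) else p)
          = out.items.map id := List.map_congr_left (fun p hp => if_neg (hnone p hp))
        _ = out.items := List.map_id _
    · simp

theorem pv_getD_insert_self (out : PySem.Dict String (List String)) (s : String) (v : List String) :
    (out.insert s v).getD s [] = v := by
  unfold PySem.Dict.getD
  rw [PySem.Dict.get?_insert_self]
  rfl

theorem pv_getD_insert_ne (out : PySem.Dict String (List String)) (s a : String) (v : List String)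
    (ha : a ≠ s) : (out.insert s v).getD a [] = out.getD a [] := by
  unfold PySem.Dict.getD
  rw [PySem.Dict.get?_insert_of_ne out v ha]

theorem pv_loopEq : ∀ (rest : List String) (out : PySem.Dict String (List String))
    (seen : PySem.Set (String × String)),
    (∀ a b, ((a, b) ∈ seen) ↔ b ∈ out.getD a []) →
    pvLoopB rest out seen = pvLoopA rest out := by
  intro rest
  induction rest with
  | nil => intro out seen _; rfl
  | cons ticker rest ih =>
    intro out seen hinv
    rw [pvLoopB, pvLoopA, pv_hitEq]
    set t := PySem.Chars.upper (PySem.Chars.strip ticker.toList) with htk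
    cases hA : pvSymbolForA t with
    | none =>
      by_cases he : t = []
      · rw [if_pos he]; exact ih out seen hinv
      · rw [if_neg he]; exact ih out seen hinv
    | some s =>
      have hne : t ≠ [] := by
        intro he
        rw [he, show pvSymbolForA [] = none from by decide] at hA
        cases hA
      rw [if_neg hne]
      simp only [Option.map_some]
      rw [if_neg (pv_valNe t s hA)]
      have hmem : (PySem.Set.contains seen (s, String.ofList t) = true)
          ↔ String.ofList t ∈ (out.setdefault s []).getD s [] := by
        rw [pv_setdefault_getD,
          show PySem.Set.contains seen (s, String.ofList t)
            = List.contains seen (s, String.ofList t) from rfl,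
          List.contains_iff_mem]
        exact hinv s (String.ofList t)
      by_cases hm : PySem.Set.contains seen (s, String.ofList t) = true
      · rw [if_pos hm, if_pos (hmem.mp hm)]
        have hcont : out.contains s = true :=
          pv_contains_of_mem_getD out s _ ((pv_setdefault_getD out s s) ▸ hmem.mp hm)
        rw [pv_setdefault_of_contains out s hcont]
        exact ih out seen hinv
      · rw [if_neg hm, if_neg (fun hx => hm (hmem.mpr hx))]
        rw [pv_stepEq]
        apply ih
        intro a b
        rw [PySem.Set.mem_add]
        unfold PySem.Dict.modify
        by_cases ha : a = s
        · subst ha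
          rw [pv_getD_insert_self]
          rw [hinv a b]
          constructor
          · rintro (hb | hb)
            · exact List.mem_append_left _ hb
            · cases hb; simp
          · intro hb
            rcases List.mem_append.mp hb with hb | hb
            · exact Or.inl hb
            · right
              simp at hb
              rw [hb]
        · rw [pv_getD_insert_ne out s a _ ha]
          rw [hinv a b]
          constructor
          · rintro (hb | hb)
            · exact hb
            · cases hb; exact absurd rfl ha
          · exact Or.inl

-- ===== VERDICT (by name: the statement is the Claim_ definition above) =====
theorem infer_polymarket_symbol_map_from_tickers_py_spec : Claim_equal_infer_polymarket_symbol_map_from_tickers_py := by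
  intro market_tickers _
  unfold Spec_infer_polymarket_symbol_map_from_tickers_py
  unfold infer_polymarket_symbol_map_from_tickers_py infer_polymarket_symbol_map_from_tickers_py_alt
  rw [pv_loopEq market_tickers PySem.Dict.empty PySem.Set.empty
    (by intro a b; simp [PySem.Dict.getD, PySem.Dict.get?, PySem.Dict.empty, PySem.Set.empty])]
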